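-- pv_equiv track=rewrite | github.com/Layer-6/ex4pl8 | expl4o5it.py | is_vulnerable_version
-- ===== SOURCE A (Python) =====
-- def is_vulnerable_version(version):
--     if not version:
--         return False
--     try:
--         v_parts = tuple(map(int, version.split('.')))
--         vulnerable_versions = [
--             (7,0), (7,1), (7,2), (7,3), (7,4), (7,5),
--             (7,6), (7,7), (7,8), (7,9), (7,10), (7,11),
--             (7,12), (7,13), (7,14), (7,15), (7,16), (7,17),
--             (7,18), (7,19), (7,20), (7,21), (7,22), (7,23),
--             (7,24), (7,25), (7,26), (7,27), (7,28)
--         ]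
--         while len(v_parts) < 2:
--             v_parts = v_parts + (0,)
--         for vuln in vulnerable_versions:
--             if v_parts[0] == vuln[0] and v_parts[1] <= vuln[1]:
--                 return True
--     except:
--         pass
--     return False
-- ===== SOURCE B (Python) =====
-- def is_vulnerable_version(version):
--     if not version:
--         return False
--     try:
--         v = [int(x) for x in version.split('.')]
--         v += [0] * (2 - len(v))
--         return v[0] == 7 and v[1] <= 28
--     except Exception:
--         return False
-- ===== Notes on version B (the rewrite author's own statement) =====
-- stated objective: simpler
-- what changed: Replaced the 29-entry vulnerable-version table and its linear scan by the closed-form test major == 7 and minor <= 28, and the while-loop padding by a single list-extension.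
import Mathlib
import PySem

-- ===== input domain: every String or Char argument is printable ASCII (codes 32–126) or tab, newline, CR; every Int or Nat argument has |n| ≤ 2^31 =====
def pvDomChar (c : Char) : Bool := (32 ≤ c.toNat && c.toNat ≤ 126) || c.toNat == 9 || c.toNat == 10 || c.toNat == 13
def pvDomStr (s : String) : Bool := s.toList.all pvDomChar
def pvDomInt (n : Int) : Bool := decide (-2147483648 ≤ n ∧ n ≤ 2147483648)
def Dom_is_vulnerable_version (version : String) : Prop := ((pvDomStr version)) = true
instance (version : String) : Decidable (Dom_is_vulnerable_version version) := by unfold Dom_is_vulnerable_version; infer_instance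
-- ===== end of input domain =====

-- B replaces A's 29-entry vulnerable-version table scan and while-loop padding by the closed-form test major == 7 && minor ≤ 28 after one list-extension (objective: simpler).

-- ===== PORT A =====
def pvVulnList : List (Int × Int) :=
  [(7,0), (7,1), (7,2), (7,3), (7,4), (7,5),
   (7,6), (7,7), (7,8), (7,9), (7,10), (7,11),
   (7,12), (7,13), (7,14), (7,15), (7,16), (7,17),
   (7,18), (7,19), (7,20), (7,21), (7,22), (7,23),
   (7,24), (7,25), (7,26), (7,27), (7,28)]

-- while len(v_parts) < 2: v_parts = v_parts + (0,)
def pvPad (t : List Int) : List Int :=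
  if t.length < 2 then pvPad (t ++ [0]) else t
termination_by 2 - t.length
decreasing_by simp; omega

def is_vulnerable_version (version : String) : Bool :=
  if version = "" then false
  else
    -- tuple(map(int, version.split('.'))); any int() failure hits the bare except -> False
    match (PySem.Chars.splitOn version.toList ['.']).mapM PySem.Int.ofChars? with
    | none => false
    | some v_parts0 =>
      let v_parts := pvPad v_parts0
      -- for vuln in vulnerable_versions: if v_parts[0] == vuln[0] and v_parts[1] <= vuln[1]: return True
      pvVulnList.any (fun vuln =>
        match PySem.List.pyGet? v_parts 0, PySem.List.pyGet? v_parts 1 with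
        | some a, some b => a == vuln.1 && decide (b ≤ vuln.2)
        | _, _ => false)

-- ===== PORT B =====
def is_vulnerable_version_alt (version : String) : Bool :=
  if version = "" then false
  else
    (((PySem.Chars.splitOn version.toList ['.']).mapM PySem.Int.ofChars?).map (fun v0 =>
      -- v += [0] * (2 - len(v))
      let v := v0 ++ List.replicate (2 - v0.length) 0
      ((PySem.List.pyGet? v 0).bind (fun a =>
        (PySem.List.pyGet? v 1).map (fun b => a == 7 && decide (b ≤ 28)))).getD false)).getD false

-- ===== PRECONDITION & SPEC =====
def Spec_is_vulnerable_version (version : String) (out : Bool) : Prop := out = is_vulnerable_version_alt version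
instance (version : String) (out : Bool) : Decidable (Spec_is_vulnerable_version version out) := by unfold Spec_is_vulnerable_version; infer_instance

-- ===== CLAIM (what is proved, stated in full; the proofs are below) =====
def Claim_equal_is_vulnerable_version : Prop := ∀ (version : String), Dom_is_vulnerable_version version → Spec_is_vulnerable_version version (is_vulnerable_version version)

-- ===== LEMMAS AND PROOFS =====

lemma pvPad_eq (t : List Int) : pvPad t = t ++ List.replicate (2 - t.length) 0 := by
  match t with
  | [] => rw [pvPad]; rw [pvPad]; rw [pvPad]; simp
  | [a] => rw [pvPad]; rw [pvPad]; simp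
  | a :: b :: r => rw [pvPad]; simp

lemma pvAny_eq (v : List Int) :
    (pvVulnList.any (fun vuln =>
        match PySem.List.pyGet? v 0, PySem.List.pyGet? v 1 with
        | some a, some b => a == vuln.1 && decide (b ≤ vuln.2)
        | _, _ => false))
    = ((PySem.List.pyGet? v 0).bind (fun a =>
        (PySem.List.pyGet? v 1).map (fun b => a == 7 && decide (b ≤ 28)))).getD false := by
  cases h0 : PySem.List.pyGet? v 0 <;> cases h1 : PySem.List.pyGet? v 1 <;>
    simp [pvVulnList]
  rw [Bool.eq_iff_iff]; simp; omega

-- ===== VERDICT (by name: the statement is the Claim_ definition above) =====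
theorem is_vulnerable_version_spec : Claim_equal_is_vulnerable_version := by
  intro version _
  unfold Spec_is_vulnerable_version is_vulnerable_version is_vulnerable_version_alt
  split
  · rfl
  · cases h : (PySem.Chars.splitOn version.toList ['.']).mapM PySem.Int.ofChars? with
    | none => simp
    | some v0 => simp only [Option.map_some, Option.getD_some, pvPad_eq, pvAny_eq]
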